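-- pv_equiv track=rewrite | github.com/avnimis/CaPS-SA-inifinigram | infini_gram.py | tokenize_documents
-- ===== SOURCE A (Python) =====
-- from typing import List, Tuple, Dict, Optional
--
-- def tokenize_documents(
--     documents: List[str],
--     eos_token_id: int = 0,
-- ) -> Tuple[List[List[int]], Dict[str, int]]:
--     """
--     Whitespace tokenizer → uint16 IDs. Token 0 is reserved for EOS.
--
--     In production, replace with:
--         from transformers import AutoTokenizer
--         tok = AutoTokenizer.from_pretrained("meta-llama/Llama-2-7b-hf", ...)
--     """
--     vocab: Dict[str, int] = {}
--     tokenized: List[List[int]] = []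
--     for doc in documents:
--         ids = []
--         for word in doc.lower().split():
--             if word not in vocab:
--                 new_id = len(vocab) + 1  # reserve 0 for EOS
--                 if new_id > 65535:
--                     raise ValueError("Vocab exceeds uint16; use a real tokenizer")
--                 vocab[word] = new_id
--             ids.append(vocab[word])
--         tokenized.append(ids)
--     return tokenized, vocab
-- ===== SOURCE B (Python) =====
-- def _assign(vocab, word):
--     if word not in vocab:
--         new_id = len(vocab) + 1  # reserve 0 for EOS
--         if new_id > 65535:
--             raise ValueError("Vocab exceeds uint16; use a real tokenizer")
--         vocab[word] = new_id
--
--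
-- def tokenize_documents(documents, eos_token_id=0):
--     # Phase 0: tokenize each document once.
--     word_lists = [doc.lower().split() for doc in documents]
--     # Phase 1: build the vocab table in first-appearance order.
--     vocab = {}
--     for words in word_lists:
--         for word in words:
--             _assign(vocab, word)
--     # Phase 2: map every word list through the finished table.
--     tokenized = [[vocab[word] for word in words] for words in word_lists]
--     return tokenized, vocab
-- ===== Notes on version B (the rewrite author's own statement) =====
-- stated objective: alternative
-- what changed: A's single interleaved loop that builds the vocab and emits ids together is replaced by three phases: tokenize every document once, build the whole vocab table in first-appearance order, then map each stored word list through the finished table by pure lookups.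
import Mathlib
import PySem

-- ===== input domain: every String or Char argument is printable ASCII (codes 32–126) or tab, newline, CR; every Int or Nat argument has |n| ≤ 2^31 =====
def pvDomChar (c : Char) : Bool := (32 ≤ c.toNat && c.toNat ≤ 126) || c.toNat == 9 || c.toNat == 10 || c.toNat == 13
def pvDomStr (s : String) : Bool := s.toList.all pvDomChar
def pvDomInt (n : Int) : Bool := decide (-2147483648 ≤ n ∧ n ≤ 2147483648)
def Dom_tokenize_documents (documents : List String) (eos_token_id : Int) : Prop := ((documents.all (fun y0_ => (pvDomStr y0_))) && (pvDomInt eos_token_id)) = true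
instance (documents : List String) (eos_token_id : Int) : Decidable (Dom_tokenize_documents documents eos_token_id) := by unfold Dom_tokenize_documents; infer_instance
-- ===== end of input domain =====

-- B splits the single interleaved build-and-emit loop of A into three phases (tokenize once,
-- build the vocab table, then map each word list through the finished table); objective: alternative decomposition.

-- ===== PORT A =====
-- literal transliteration of A's interleaved loop; where A raises ValueError (65536th distinct
-- word, excluded by Pre_) the port leaves the vocab unchanged.
def tokenize_documents (documents : List String) (eos_token_id : Int) : List (List Int) × (List (String × Int)) :=
  let r := documents.foldl
    (fun (st : PySem.Dict String Int × List (List Int)) doc =>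
      let inner := (PySem.Str.split₀ (PySem.Str.lower doc)).foldl
        (fun (s : PySem.Dict String Int × List Int) word =>
          let vocab :=
            if s.1.contains word = false then
              let new_id : Int := (s.1.size : Int) + 1
              if new_id > 65535 then s.1 else s.1.insert word new_id
            else s.1
          (vocab, s.2 ++ [vocab.getD word 0]))
        (st.1, [])
      (inner.1, st.2 ++ [inner.2]))
    (PySem.Dict.empty, [])
  (r.2, r.1.items)

-- ===== PORT B =====
-- port of Source B's helper _assign (where Source B raises — excluded by Pre_ — it leaves vocab unchanged)
def pvAssign (vocab : PySem.Dict String Int) (word : String) : PySem.Dict String Int :=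
  if vocab.contains word = false then
    let new_id : Int := (vocab.size : Int) + 1
    if new_id > 65535 then vocab else vocab.insert word new_id
  else vocab

def tokenize_documents_alt (documents : List String) (eos_token_id : Int) : List (List Int) × (List (String × Int)) :=
  let word_lists := documents.map (fun doc => PySem.Str.split₀ (PySem.Str.lower doc))
  let vocab := word_lists.foldl (fun v words => words.foldl pvAssign v) PySem.Dict.empty
  let tokenized := word_lists.map (fun words => words.map (fun word => vocab.getD word 0))
  (tokenized, vocab.items)

-- ===== PRECONDITION & SPEC =====
-- Pre_ excludes exactly the inputs with more than 65535 distinct (lowercased, whitespace-split)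
-- words, on which A raises ValueError (and B raises the same error).
def Pre_tokenize_documents (documents : List String) (eos_token_id : Int) : Prop :=
  ((documents.flatMap (fun doc => PySem.Str.split₀ (PySem.Str.lower doc))).dedup).length ≤ 65535
instance (documents : List String) (eos_token_id : Int) : Decidable (Pre_tokenize_documents documents eos_token_id) := by unfold Pre_tokenize_documents; infer_instance

def pvWitness_tokenize_documents : List String × Int := (["a b a"], 0)

def Spec_tokenize_documents (documents : List String) (eos_token_id : Int) (out : List (List Int) × (List (String × Int))) : Prop := out = tokenize_documents_alt documents eos_token_id
instance (documents : List String) (eos_token_id : Int) (out : List (List Int) × (List (String × Int))) : Decidable (Spec_tokenize_documents documents eos_token_id out) := by unfold Spec_tokenize_documents; infer_instance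

-- ===== CLAIM (what is proved, stated in full; the proofs are below) =====
def Claim_equal_tokenize_documents : Prop := ∀ (documents : List String) (eos_token_id : Int), Dom_tokenize_documents documents eos_token_id → Pre_tokenize_documents documents eos_token_id → Spec_tokenize_documents documents eos_token_id (tokenize_documents documents eos_token_id)

-- ===== LEMMAS AND PROOFS =====

-- a lookup that already succeeds is preserved by pvAssign (it only inserts fresh keys)
lemma pv_get?_assign_of_some (v : PySem.Dict String Int) (w u : String) (i : Int)
    (h : v.get? u = some i) : (pvAssign v w).get? u = some i := by
  unfold pvAssign
  by_cases hc : v.contains w = false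
  · simp only [hc, if_true]
    by_cases hid : ((v.size : Int) + 1 > 65535)
    · simpa [hid] using h
    · simp only [hid, if_false]
      rcases eq_or_ne u w with rfl | hne
      · exfalso
        rw [PySem.Dict.contains_eq_isSome_get?, h] at hc
        simp at hc
      · rw [PySem.Dict.get?_insert_of_ne _ _ hne]; exact h
  · simpa [hc] using h

lemma pv_get?_fold_of_some (ws : List String) (v : PySem.Dict String Int) (u : String) (i : Int)
    (h : v.get? u = some i) : (ws.foldl pvAssign v).get? u = some i := by
  induction ws generalizing v with
  | nil => exact h
  | cons w ws ih => exact ih _ (pv_get?_assign_of_some v w u i h)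

lemma pv_assign_of_full (v : PySem.Dict String Int) (w : String) (h : 65535 ≤ v.size) :
    pvAssign v w = v := by
  unfold pvAssign
  by_cases hc : v.contains w = false
  · have : ((v.size : Int) + 1 > 65535) := by exact_mod_cast by omega
    simp [hc, this]
  · simp [hc]

lemma pv_fold_of_full (ws : List String) (v : PySem.Dict String Int) (h : 65535 ≤ v.size) :
    ws.foldl pvAssign v = v := by
  induction ws generalizing v with
  | nil => rfl
  | cons w ws ih => rw [List.foldl_cons, pv_assign_of_full v w h, ih v h]

-- the id a word receives at emission time persists to the end of the build
lemma pv_getD_persist (ws : List String) (v : PySem.Dict String Int) (w : String) :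
    (pvAssign v w).getD w 0 = ((ws.foldl pvAssign (pvAssign v w)).getD w 0) := by
  cases h : (pvAssign v w).get? w with
  | some i =>
    rw [PySem.Dict.getD_of_get?_eq_some _ _ h,
        PySem.Dict.getD_of_get?_eq_some _ _ (pv_get?_fold_of_some ws _ w i h)]
  | none =>
    have hfull : 65535 ≤ v.size := by
      by_contra hlt
      rw [not_le] at hlt
      unfold pvAssign at h
      by_cases hc : v.contains w = false
      · have hid : ¬ ((v.size : Int) + 1 > 65535) := by exact_mod_cast by omega
        rw [if_pos hc, if_neg hid, PySem.Dict.get?_insert_self] at h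
        simp at h
      · simp only [if_neg hc] at h
        rw [PySem.Dict.contains_eq_isSome_get?, h] at hc
        simp at hc
    rw [pv_assign_of_full v w hfull, pv_fold_of_full ws v hfull]

-- A's loop bodies, named (definitionally equal to the lambdas in the port of A)
def pvStep (s : PySem.Dict String Int × List Int) (word : String) :
    PySem.Dict String Int × List Int :=
  (pvAssign s.1 word, s.2 ++ [(pvAssign s.1 word).getD word 0])

def pvDocStep (st : PySem.Dict String Int × List (List Int)) (doc : String) :
    PySem.Dict String Int × List (List Int) :=
  let inner := (PySem.Str.split₀ (PySem.Str.lower doc)).foldl pvStep (st.1, [])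
  (inner.1, st.2 ++ [inner.2])

-- characterisation of A's inner loop against the vocab as it stands after ws ++ rest
lemma pv_innerA (ws rest : List String) (v : PySem.Dict String Int) (ids : List Int) :
    ws.foldl pvStep (v, ids)
    = (ws.foldl pvAssign v,
       ids ++ ws.map (fun w => ((ws ++ rest).foldl pvAssign v).getD w 0)) := by
  induction ws generalizing v ids with
  | nil => simp
  | cons w ws ih =>
    simp only [List.foldl_cons, List.map_cons, List.cons_append]
    show ws.foldl pvStep (pvAssign v w, ids ++ [(pvAssign v w).getD w 0]) = _
    rw [ih (pvAssign v w) _, ← pv_getD_persist (ws ++ rest) v w]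
    simp

-- characterisation of A's outer loop against the final vocab
lemma pv_outerA (docs : List String) (v : PySem.Dict String Int) (tok : List (List Int)) :
    docs.foldl pvDocStep (v, tok)
    = ((docs.flatMap (fun d => PySem.Str.split₀ (PySem.Str.lower d))).foldl pvAssign v,
       tok ++ docs.map (fun d => (PySem.Str.split₀ (PySem.Str.lower d)).map
         (fun w => ((docs.flatMap (fun d => PySem.Str.split₀ (PySem.Str.lower d))).foldl pvAssign v).getD w 0))) := by
  induction docs generalizing v tok with
  | nil => simp
  | cons d docs ih =>
    simp only [List.foldl_cons, List.map_cons, List.flatMap_cons]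
    show docs.foldl pvDocStep
        (((PySem.Str.split₀ (PySem.Str.lower d)).foldl pvStep (v, [])).1,
         tok ++ [((PySem.Str.split₀ (PySem.Str.lower d)).foldl pvStep (v, [])).2]) = _
    rw [pv_innerA _ (docs.flatMap (fun d => PySem.Str.split₀ (PySem.Str.lower d))) v []]
    rw [ih]
    simp [List.foldl_append]

-- ===== VERDICT (by name: the statement is the Claim_ definition above) =====
theorem tokenize_documents_spec : Claim_equal_tokenize_documents := by
  intro documents eos_token_id _ _
  unfold Spec_tokenize_documents
  show (let r := documents.foldl pvDocStep (PySem.Dict.empty, [])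
        ((r.2 : List (List Int)), r.1.items))
      = tokenize_documents_alt documents eos_token_id
  rw [pv_outerA]
  unfold tokenize_documents_alt
  simp [List.flatMap_def, List.foldl_flatten, List.map_map, Function.comp_def]
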